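-- pv_equiv track=rewrite | github.com/Jazende/AdventOfCode | aoc23/14.py | roll_north
-- ===== SOURCE A (Python) =====
-- def roll_north(blocks, boulders, rows, cols):
--     # x[1] / row zo klein mogelijk
--     boulders.sort(key=lambda x: x[1])
--     new_boulders = []
--     for boulder in boulders:
--         col, row = boulder
--         while True:
--             if (col, row-1) in blocks or (col, row-1) in new_boulders or row == 0:
--                 new_boulders.append( (col, row) )
--                 break
--             row -= 1
--     return new_boulders
-- ===== SOURCE B (Python) =====
-- def roll_north(blocks, boulders, rows, cols):
--     # same in-place sort side effect as A
--     boulders.sort(key=lambda x: x[1])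
--     out = []
--     for col, row in boulders:
--         stop = 0
--         for c, b in blocks:
--             if c == col and b < row and b + 1 > stop:
--                 stop = b + 1
--         for c, s in out:
--             if c == col and s < row and s + 1 > stop:
--                 stop = s + 1
--         out.append((col, stop))
--     return out
-- ===== Notes on version B (the rewrite author's own statement) =====
-- stated objective: faster
-- what changed: B replaces A's cell-by-cell while-descent (with a full membership scan of blocks and the settled list at every step) by a direct computation of each boulder's landing row as the maximum stop candidate (blocker row + 1, floored at 0) in its column, one pass over blocks and one over the settled list per boulder.
-- outside the precondition, e.g. on roll_north({(0, -2)}, [(0, -1)], 1, 1): A returns [(0, -1)], B returns [(0, 0)]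
import Mathlib
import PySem

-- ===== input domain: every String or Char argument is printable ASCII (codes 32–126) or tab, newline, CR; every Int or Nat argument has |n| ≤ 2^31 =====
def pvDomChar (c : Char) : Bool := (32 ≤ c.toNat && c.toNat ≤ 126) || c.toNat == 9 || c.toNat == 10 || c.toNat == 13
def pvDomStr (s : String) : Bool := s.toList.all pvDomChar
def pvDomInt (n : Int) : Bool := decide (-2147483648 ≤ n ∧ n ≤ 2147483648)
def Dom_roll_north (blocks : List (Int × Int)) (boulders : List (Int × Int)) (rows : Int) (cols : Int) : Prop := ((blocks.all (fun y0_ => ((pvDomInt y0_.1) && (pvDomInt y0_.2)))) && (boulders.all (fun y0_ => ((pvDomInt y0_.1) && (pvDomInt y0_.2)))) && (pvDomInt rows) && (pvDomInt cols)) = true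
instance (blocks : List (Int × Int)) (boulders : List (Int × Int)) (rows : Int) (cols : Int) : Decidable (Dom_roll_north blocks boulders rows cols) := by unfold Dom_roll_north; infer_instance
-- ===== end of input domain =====

-- B computes each boulder's landing row directly as the maximal stop candidate in its column
-- (blocker row + 1, floored at 0) instead of A's cell-by-cell descent; equivalence is about the
-- RETURN value (both Pythons sort `boulders` in place the same way).

-- ===== PORT A =====
-- the `while True` descent; the `row ≤ 0` branch is a termination guard: Python loops forever
-- there, and Pre_roll_north excludes those inputs
def rollDescend (blocks newb : List (Int × Int)) (col : Int) (row : Int) : Int :=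
  if (col, row - 1) ∈ blocks ∨ (col, row - 1) ∈ newb ∨ row = 0 then row
  else if row ≤ 0 then row
  else rollDescend blocks newb col (row - 1)
termination_by row.toNat
decreasing_by omega

def roll_north (blocks : List (Int × Int)) (boulders : List (Int × Int)) (rows : Int) (cols : Int) : List (Int × Int) :=
  let bs := PySem.List.sorted boulders (fun x => x.2)
  bs.foldl (fun newb b => newb ++ [(b.1, rollDescend blocks newb b.1 b.2)]) []

-- ===== PORT B =====
-- one pass of Source B's max accumulation over a list of (c, r) pairs
def altStopPass (l : List (Int × Int)) (col row : Int) (stop : Int) : Int :=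
  l.foldl (fun st p => if p.1 = col ∧ p.2 < row ∧ p.2 + 1 > st then p.2 + 1 else st) stop

def roll_north_alt (blocks : List (Int × Int)) (boulders : List (Int × Int)) (rows : Int) (cols : Int) : List (Int × Int) :=
  let bs := PySem.List.sorted boulders (fun x => x.2)
  bs.foldl (fun out b => out ++ [(b.1, altStopPass out b.1 b.2 (altStopPass blocks b.1 b.2 0))]) []

-- ===== PRECONDITION & SPEC =====
-- Pre_ excludes boulders with a negative row, outside the grid's natural domain: there A's
-- descent either loops forever (nothing below, never reaching row 0) or stops at a negative row,
-- while B floors every landing row at 0.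
def Pre_roll_north (blocks : List (Int × Int)) (boulders : List (Int × Int)) (rows : Int) (cols : Int) : Prop :=
  ∀ p ∈ boulders, 0 ≤ p.2
instance (blocks : List (Int × Int)) (boulders : List (Int × Int)) (rows : Int) (cols : Int) : Decidable (Pre_roll_north blocks boulders rows cols) := by unfold Pre_roll_north; infer_instance

def pvWitness_roll_north : (List (Int × Int)) × (List (Int × Int)) × Int × Int :=
  ([(0, 1), (1, 0)], [(0, 3), (1, 2), (0, 4)], 5, 2)

def Spec_roll_north (blocks : List (Int × Int)) (boulders : List (Int × Int)) (rows : Int) (cols : Int) (out : List (Int × Int)) : Prop := out = roll_north_alt blocks boulders rows cols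
instance (blocks : List (Int × Int)) (boulders : List (Int × Int)) (rows : Int) (cols : Int) (out : List (Int × Int)) : Decidable (Spec_roll_north blocks boulders rows cols out) := by unfold Spec_roll_north; infer_instance

-- ===== CLAIM (what is proved, stated in full; the proofs are below) =====
def Claim_equal_roll_north : Prop := ∀ (blocks : List (Int × Int)) (boulders : List (Int × Int)) (rows : Int) (cols : Int), Dom_roll_north blocks boulders rows cols → Pre_roll_north blocks boulders rows cols → Spec_roll_north blocks boulders rows cols (roll_north blocks boulders rows cols)

-- ===== LEMMAS AND PROOFS =====

-- the max-accumulation pass is exactly the maximum of start and all candidates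
theorem altStopPass_cons (a : Int × Int) (t : List (Int × Int)) (col row s : Int) :
    altStopPass (a :: t) col row s =
      altStopPass t col row (if a.1 = col ∧ a.2 < row ∧ a.2 + 1 > s then a.2 + 1 else s) := rfl

-- the max-accumulation pass is exactly the maximum of start and all candidates
theorem altStopPass_spec (l : List (Int × Int)) (col row : Int) : ∀ s : Int,
    s ≤ altStopPass l col row s ∧
    (altStopPass l col row s = s ∨
      ∃ p ∈ l, p.1 = col ∧ p.2 < row ∧ altStopPass l col row s = p.2 + 1) ∧
    (∀ p ∈ l, p.1 = col → p.2 < row → p.2 + 1 ≤ altStopPass l col row s) := by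
  induction l with
  | nil => intro s; simp [altStopPass]
  | cons a t ih =>
    intro s
    rw [altStopPass_cons]
    by_cases h : a.1 = col ∧ a.2 < row ∧ a.2 + 1 > s
    · rw [if_pos h]
      obtain ⟨h1, h2, h3⟩ := ih (a.2 + 1)
      refine ⟨le_trans (by omega) h1, ?_, ?_⟩
      · rcases h2 with h2 | ⟨p, hp, hc, hr, he⟩
        · exact Or.inr ⟨a, List.mem_cons_self, h.1, h.2.1, h2⟩
        · exact Or.inr ⟨p, List.mem_cons_of_mem _ hp, hc, hr, he⟩
      · intro p hp hc hr
        rcases List.mem_cons.mp hp with hpa | hpt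
        · subst hpa; exact h1
        · exact h3 p hpt hc hr
    · rw [if_neg h]
      obtain ⟨h1, h2, h3⟩ := ih s
      refine ⟨h1, ?_, ?_⟩
      · rcases h2 with h2 | ⟨p, hp, hc, hr, he⟩
        · exact Or.inl h2
        · exact Or.inr ⟨p, List.mem_cons_of_mem _ hp, hc, hr, he⟩
      · intro p hp hc hr
        rcases List.mem_cons.mp hp with hpa | hpt
        · subst hpa
          have : p.2 + 1 ≤ s := by
            by_contra hgt
            exact h ⟨hc, hr, by omega⟩
          exact le_trans this h1
        · exact h3 p hpt hc hr

-- any z that is in range, is a stop candidate (or 0), and dominates all candidates ≤ row,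
-- equals A's descent result
theorem descend_eq_of_max (blocks newb : List (Int × Int)) (col row z : Int)
    (hrow : 0 ≤ row) (hz0 : 0 ≤ z) (hzr : z ≤ row)
    (hcand : z = 0 ∨ (col, z - 1) ∈ blocks ∨ (col, z - 1) ∈ newb)
    (hmax : ∀ y, z < y → y ≤ row → (col, y - 1) ∉ blocks ∧ (col, y - 1) ∉ newb) :
    rollDescend blocks newb col row = z := by
  rw [rollDescend]
  by_cases hstop : (col, row - 1) ∈ blocks ∨ (col, row - 1) ∈ newb ∨ row = 0
  · rw [if_pos hstop]
    rcases hstop with h | h | h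
    · by_contra hne
      exact (hmax row (by omega) le_rfl).1 h
    · by_contra hne
      exact (hmax row (by omega) le_rfl).2 h
    · omega
  · rw [if_neg hstop, if_neg (by omega)]
    push Not at hstop
    have hzlt : z ≤ row - 1 := by
      rcases lt_or_eq_of_le hzr with h | h
      · omega
      · subst h
        rcases hcand with h | h | h
        · omega
        · exact absurd h hstop.1
        · exact absurd h hstop.2.1
    exact descend_eq_of_max blocks newb col (row - 1) z (by omega) hz0 hzlt hcand
      (fun y hy hyr => hmax y hy (by omega))
termination_by row.toNat
decreasing_by omega

-- the per-boulder step of B computes A's descent result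
theorem step_eq (blocks newb : List (Int × Int)) (col row : Int) (hrow : 0 ≤ row) :
    rollDescend blocks newb col row =
      altStopPass newb col row (altStopPass blocks col row 0) := by
  rcases altStopPass_spec blocks col row 0 with ⟨b1, b2, b3⟩
  rcases altStopPass_spec newb col row (altStopPass blocks col row 0) with ⟨n1, n2, n3⟩
  set z := altStopPass newb col row (altStopPass blocks col row 0) with hz
  have hz0 : 0 ≤ z := le_trans b1 n1
  have hzr : z ≤ row := by
    rcases n2 with h | ⟨p, _, _, hr, he⟩
    · rw [h]
      rcases b2 with h' | ⟨q, _, _, hqr, hqe⟩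
      · omega
      · omega
    · omega
  apply descend_eq_of_max blocks newb col row z hrow hz0 hzr
  · rcases n2 with h | ⟨p, hp, hc, _, he⟩
    · rcases b2 with h' | ⟨q, hq, hqc, _, hqe⟩
      · left; omega
      · right; left
        have : (col, z - 1) = q := by rw [h, hqe]; exact Prod.ext hqc.symm (by omega)
        rw [this]; exact hq
    · right; right
      have : (col, z - 1) = p := by rw [he]; exact Prod.ext hc.symm (by omega)
      rw [this]; exact hp
  · intro y hy hyr
    constructor
    · intro hmem
      have := b3 (col, y - 1) hmem rfl (by omega)
      have := le_trans this n1
      omega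
    · intro hmem
      have := n3 (col, y - 1) hmem rfl (by omega)
      omega

-- the two top-level folds agree step by step when every boulder row is nonnegative
theorem folds_eq (blocks : List (Int × Int)) (bs : List (Int × Int)) (acc : List (Int × Int))
    (h : ∀ p ∈ bs, 0 ≤ p.2) :
    bs.foldl (fun newb b => newb ++ [(b.1, rollDescend blocks newb b.1 b.2)]) acc =
    bs.foldl (fun out b => out ++ [(b.1, altStopPass out b.1 b.2 (altStopPass blocks b.1 b.2 0))]) acc := by
  induction bs generalizing acc with
  | nil => rfl
  | cons a t ih =>
    simp only [List.foldl_cons]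
    rw [step_eq blocks acc a.1 a.2 (h a List.mem_cons_self)]
    exact ih _ (fun p hp => h p (List.mem_cons_of_mem _ hp))

-- ===== VERDICT (by name: the statement is the Claim_ definition above) =====
theorem roll_north_spec : Claim_equal_roll_north := by
  intro blocks boulders rows cols _ hpre
  show roll_north blocks boulders rows cols = roll_north_alt blocks boulders rows cols
  unfold roll_north roll_north_alt
  exact folds_eq blocks _ []
    (fun p hp => hpre p ((PySem.List.mem_sorted _ _ _ _).mp hp))
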